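-- pv_equiv track=rewrite | github.com/kakusingh120/DIP | Experiment3/krish_shannon.py | create_codes
-- ===== SOURCE A (Python) =====
-- def create_codes(frequency):
--     #Sort characters by frequency (descending)
--     sorted_chars = sorted(frequency.items(), key=lambda item: item[1], reverse=True)
--
--     #Dictionary to store codes, initializing no code for every character
--     codes = {char: '' for char, x in sorted_chars}
--
--     def assign_codes(char_list):
--         if len(char_list) <= 1:
--             return
--
--         # Split the list into two halves
--         mid = len(char_list) // 2
--         left = char_list[:mid]
--         right = char_list[mid:]
--
--         # Add '0' to left group codes
--         for char, x in left:
--             codes[char] += '0'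
--         # Add '1' to right group codes
--         for char, x in right:
--             codes[char] += '1'
--
--         # Repeat
--         assign_codes(left)
--         assign_codes(right)
--
--     assign_codes(sorted_chars)
--     return codes
-- ===== SOURCE B (Python) =====
-- def create_codes(frequency):
--     # Per-character closed-form: each code is the branch sequence of a binary
--     # search for the character's rank in [0, n), no segment recursion needed.
--     sorted_chars = sorted(frequency.items(), key=lambda item: item[1], reverse=True)
--     n = len(sorted_chars)
--     codes = {}
--     for i, (ch, _) in enumerate(sorted_chars):
--         lo, hi, bits = 0, n, ''
--         while hi - lo > 1:
--             mid = lo + (hi - lo) // 2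
--             if i < mid:
--                 bits += '0'
--                 hi = mid
--             else:
--                 bits += '1'
--                 lo = mid
--         codes[ch] = bits
--     return codes
-- ===== Notes on version B (the rewrite author's own statement) =====
-- stated objective: alternative
-- what changed: Replaces the recursive segment-splitting pass that mutates a shared codes dict with an independent per-character computation: each code is the bit path of a binary search for the character's rank in [0, n), so no segment lists and no cross-segment dict mutation exist at all.
import Mathlib
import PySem

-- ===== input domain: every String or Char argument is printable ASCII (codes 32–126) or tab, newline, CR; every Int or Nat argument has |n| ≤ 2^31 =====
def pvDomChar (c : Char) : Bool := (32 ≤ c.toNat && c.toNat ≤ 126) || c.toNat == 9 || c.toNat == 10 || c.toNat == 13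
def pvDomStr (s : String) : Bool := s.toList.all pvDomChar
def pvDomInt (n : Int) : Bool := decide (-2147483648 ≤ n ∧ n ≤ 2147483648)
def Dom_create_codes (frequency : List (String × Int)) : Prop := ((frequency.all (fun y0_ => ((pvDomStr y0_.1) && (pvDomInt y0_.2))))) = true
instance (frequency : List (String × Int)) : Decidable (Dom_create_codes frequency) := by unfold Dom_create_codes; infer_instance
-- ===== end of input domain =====

-- B computes each code independently as the bit path of a binary search for the character's
-- rank, instead of A's recursive segment splitting over a shared codes dict (return values only).

-- ===== PORT A =====
-- recursive assign_codes: codes[char] += bit is Dict.modify with default "" — exact here since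
-- every char of a segment was initialised in codes; cl[:mid]/cl[mid:] with 0 ≤ mid ≤ len are take/drop
def assignA (cl : List (String × Int)) (codes : PySem.Dict String String) : PySem.Dict String String :=
  if cl.length ≤ 1 then codes
  else
    let mid := cl.length / 2
    let left := cl.take mid
    let right := cl.drop mid
    let codes1 := left.foldl (fun d p => d.modify p.1 "" (· ++ "0")) codes
    let codes2 := right.foldl (fun d p => d.modify p.1 "" (· ++ "1")) codes1
    assignA right (assignA left codes2)
termination_by cl.length
decreasing_by
  all_goals simp_all [List.length_take, List.length_drop]
  all_goals omega

def create_codes (frequency : List (String × Int)) : List (String × String) :=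
  let sorted_chars := PySem.List.sorted frequency (fun item => item.2) true
  let codes := sorted_chars.foldl (fun d p => d.insert p.1 "") PySem.Dict.empty
  (assignA sorted_chars codes).items

-- ===== PORT B =====
-- the while loop of Source B: bits accumulated front-to-back, (lo, hi) narrowed around rank i
def codeB (i lo hi : Int) : String :=
  if _h : hi - lo ≤ 1 then ""
  else
    let mid := lo + PySem.Int.floordiv (hi - lo) 2
    if i < mid then "0" ++ codeB i lo mid else "1" ++ codeB i mid hi
termination_by (hi - lo).toNat
decreasing_by
  all_goals
    rw [PySem.Int.floordiv_eq_ediv_of_pos (by omega)]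
    omega

def create_codes_alt (frequency : List (String × Int)) : List (String × String) :=
  let sorted_chars := PySem.List.sorted frequency (fun item => item.2) true
  let n : Int := sorted_chars.length
  ((PySem.List.enumerate sorted_chars).foldl
    (fun d p => d.insert p.2.1 (codeB p.1 0 n)) PySem.Dict.empty).items

-- ===== PRECONDITION & SPEC =====
-- Pre_ excludes association lists with duplicate keys: they cannot arise from A's dict
-- parameter (a Python dict has unique keys), and the dict-collapse behaviour of the
-- association-list encoding is accidental there.
def Pre_create_codes (frequency : List (String × Int)) : Prop :=
  (frequency.map Prod.fst).Nodup
instance (frequency : List (String × Int)) : Decidable (Pre_create_codes frequency) := by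
  unfold Pre_create_codes; infer_instance

def pvWitness_create_codes : (List (String × Int)) := [("a", 3), ("b", 1), ("c", 2)]

def Spec_create_codes (frequency : List (String × Int)) (out : List (String × String)) : Prop := out = create_codes_alt frequency
instance (frequency : List (String × Int)) (out : List (String × String)) : Decidable (Spec_create_codes frequency out) := by unfold Spec_create_codes; infer_instance

-- ===== CLAIM (what is proved, stated in full; the proofs are below) =====
def Claim_equal_create_codes : Prop := ∀ (frequency : List (String × Int)), Dom_create_codes frequency → Pre_create_codes frequency → Spec_create_codes frequency (create_codes frequency)

-- ===== LEMMAS AND PROOFS =====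

-- B's while loop is translation invariant in (i, lo, hi)
lemma codeB_shift : ∀ (m : ℕ) (i lo hi t : Int), (hi - lo).toNat = m →
    codeB (i + t) (lo + t) (hi + t) = codeB i lo hi := by
  intro m
  induction m using Nat.strong_induction_on with
  | _ m ih =>
    intro i lo hi t hm
    rw [codeB, codeB]
    by_cases h : hi - lo ≤ 1
    · simp [h]
    · have h' : ¬ (hi + t - (lo + t) ≤ 1) := by omega
      simp only [h, h', dif_neg, not_false_iff]
      have hdv : hi + t - (lo + t) = hi - lo := by ring
      rw [hdv]
      have hmid : 0 < PySem.Int.floordiv (hi - lo) 2 := by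
        rw [PySem.Int.floordiv_eq_ediv_of_pos (by omega)]; omega
      have hmlt : PySem.Int.floordiv (hi - lo) 2 < hi - lo := by
        rw [PySem.Int.floordiv_eq_ediv_of_pos (by omega)]; omega
      by_cases hc : i < lo + PySem.Int.floordiv (hi - lo) 2
      · have hc' : i + t < lo + t + PySem.Int.floordiv (hi - lo) 2 := by omega
        simp only [hc, hc', if_true]
        have := ih (lo + PySem.Int.floordiv (hi - lo) 2 - lo).toNat (by omega) i lo
          (lo + PySem.Int.floordiv (hi - lo) 2) t rfl
        rw [show lo + t + PySem.Int.floordiv (hi - lo) 2 = lo + PySem.Int.floordiv (hi - lo) 2 + t by ring, this]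
      · have hc' : ¬ (i + t < lo + t + PySem.Int.floordiv (hi - lo) 2) := by omega
        simp only [hc, hc', if_false]
        have := ih (hi - (lo + PySem.Int.floordiv (hi - lo) 2)).toNat (by omega) i
          (lo + PySem.Int.floordiv (hi - lo) 2) hi t rfl
        rw [show lo + t + PySem.Int.floordiv (hi - lo) 2 = lo + PySem.Int.floordiv (hi - lo) 2 + t by ring, this]

lemma codeB_left (len mid j : ℕ) (h2 : 2 ≤ len) (hm : mid = len / 2) (hj : j < mid) :
    codeB j 0 len = "0" ++ codeB j 0 mid := by
  rw [codeB]
  have hInt : ¬ ((len : Int) - 0 ≤ 1) := by omega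
  simp only [dif_neg hInt]
  have hmid : (0:Int) + PySem.Int.floordiv ((len:Int) - 0) 2 = (mid:ℕ) := by
    rw [PySem.Int.floordiv_eq_ediv_of_pos (by omega)]; omega
  rw [hmid, if_pos (by exact_mod_cast hj)]

lemma codeB_right (len mid j : ℕ) (h2 : 2 ≤ len) (hm : mid = len / 2) (hj : mid ≤ j) (hj2 : j < len) :
    codeB j 0 len = "1" ++ codeB (j - mid : ℕ) 0 ((len - mid : ℕ)) := by
  rw [codeB]
  have hInt : ¬ ((len : Int) - 0 ≤ 1) := by omega
  simp only [dif_neg hInt]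
  have hmid : (0:Int) + PySem.Int.floordiv ((len:Int) - 0) 2 = (mid:ℕ) := by
    rw [PySem.Int.floordiv_eq_ediv_of_pos (by omega)]; omega
  rw [hmid, if_neg (by push_cast; omega)]
  have hs := codeB_shift ((len:Int) - mid).toNat ((j - mid : ℕ)) 0 ((len - mid : ℕ)) mid (by push_cast; omega)
  rw [show (↑(j-mid) + (↑mid:Int)) = ↑j by omega,
      show ((0:Int) + ↑mid) = (↑mid:Int) by omega,
      show (↑(len-mid) + (↑mid:Int)) = ↑len by omega] at hs
  rw [hs]

-- A's 'codes[char] += b' loop over a half, seen through getD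
lemma getD_fold_modify_not_mem (b : String) :
    ∀ (l : List (String × Int)) (d : PySem.Dict String String) (k : String),
    k ∉ l.map Prod.fst →
    (l.foldl (fun d p => d.modify p.1 "" (· ++ b)) d).getD k "" = d.getD k "" := by
  intro l
  induction l with
  | nil => intros; rfl
  | cons p t ih =>
    intro d k hk
    simp only [List.map_cons, List.mem_cons, not_or] at hk
    simp only [List.foldl_cons]
    rw [ih _ k hk.2, PySem.Dict.getD_modify_of_ne _ _ _ hk.1]

lemma getD_fold_modify_mem (b : String) :
    ∀ (l : List (String × Int)) (d : PySem.Dict String String) (k : String),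
    (l.map Prod.fst).Nodup → k ∈ l.map Prod.fst →
    (l.foldl (fun d p => d.modify p.1 "" (· ++ b)) d).getD k "" = d.getD k "" ++ b := by
  intro l
  induction l with
  | nil => simp
  | cons p t ih =>
    intro d k hnd hk
    simp only [List.map_cons, List.nodup_cons] at hnd
    simp only [List.foldl_cons]
    rcases List.mem_cons.mp hk with h | h
    · rw [getD_fold_modify_not_mem b t _ k (h ▸ hnd.1), h, PySem.Dict.getD_modify_self]
    · rw [ih _ k hnd.2 h, PySem.Dict.getD_modify_of_ne]
      intro he; exact hnd.1 (he ▸ h)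

lemma update_eq_self : ∀ (l s : List String), (∀ x ∈ l, x ∈ s) → PySem.Set.update s l = s := by
  intro l
  induction l with
  | nil => intro s _; simp [PySem.Set.update]
  | cons x t ih =>
    intro s h
    simp only [PySem.Set.update, List.foldl_cons] at *
    rw [show PySem.Set.add s x = s from by simp [PySem.Set.add, h x (by simp)]]
    exact ih s (fun y hy => h y (by simp [hy]))

lemma keys_fold_modify (b : String) (l : List (String × Int)) (d : PySem.Dict String String)
    (h : ∀ p ∈ l, p.1 ∈ d.keys) :
    (l.foldl (fun d p => d.modify p.1 "" (· ++ b)) d).keys = d.keys := by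
  rw [PySem.Dict.keys_foldl_modify_key l Prod.fst "" (fun _ p v => v ++ b) d]
  exact update_eq_self _ _ (by intro x hx; obtain ⟨p, hp, rfl⟩ := List.mem_map.mp hx; exact h p hp)

lemma keys_assignA : ∀ (n : ℕ) (seg : List (String × Int)), seg.length = n →
    ∀ (d : PySem.Dict String String), (∀ p ∈ seg, p.1 ∈ d.keys) →
    (assignA seg d).keys = d.keys := by
  intro n
  induction n using Nat.strong_induction_on with
  | _ n ih =>
    intro seg hlen d h
    rw [assignA]
    by_cases hs : seg.length ≤ 1
    · simp [hs]
    · simp only [hs, if_false]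
      have hk1 := keys_fold_modify "0" (seg.take (seg.length / 2)) d
        (fun p hp => h p (List.mem_of_mem_take hp))
      have h2 : ∀ p ∈ seg.drop (seg.length / 2),
          p.1 ∈ ((seg.take (seg.length / 2)).foldl (fun d p => d.modify p.1 "" (· ++ "0")) d).keys := by
        intro p hp
        rw [hk1]; exact h p (List.mem_of_mem_drop hp)
      have hk2 := keys_fold_modify "1" (seg.drop (seg.length / 2)) _ h2
      have hkl := ih (seg.take (seg.length / 2)).length
        (by simp [List.length_take]; omega) _ rfl
        ((seg.drop (seg.length / 2)).foldl (fun d p => d.modify p.1 "" (· ++ "1")) _)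
        (by intro p hp; rw [hk2, hk1]; exact h p (List.mem_of_mem_take hp))
      have hkr := ih (seg.drop (seg.length / 2)).length
        (by simp [List.length_drop]; omega) _ rfl
        (assignA (seg.take (seg.length / 2)) _)
        (by intro p hp; rw [hkl, hk2, hk1]; exact h p (List.mem_of_mem_drop hp))
      rw [hkr, hkl, hk2, hk1]

lemma getD_assignA_not_mem : ∀ (n : ℕ) (seg : List (String × Int)), seg.length = n →
    ∀ (d : PySem.Dict String String) (k : String), k ∉ seg.map Prod.fst →
    (assignA seg d).getD k "" = d.getD k "" := by
  intro n
  induction n using Nat.strong_induction_on with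
  | _ n ih =>
    intro seg hlen d k hk
    rw [assignA]
    by_cases hs : seg.length ≤ 1
    · simp [hs]
    · simp only [hs, if_false]
      have hkt : k ∉ (seg.take (seg.length / 2)).map Prod.fst := by
        intro h; exact hk (by
          obtain ⟨p, hp, rfl⟩ := List.mem_map.mp h
          exact List.mem_map.mpr ⟨p, List.mem_of_mem_take hp, rfl⟩)
      have hkd : k ∉ (seg.drop (seg.length / 2)).map Prod.fst := by
        intro h; exact hk (by
          obtain ⟨p, hp, rfl⟩ := List.mem_map.mp h
          exact List.mem_map.mpr ⟨p, List.mem_of_mem_drop hp, rfl⟩)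
      rw [ih (seg.drop (seg.length / 2)).length (by simp [List.length_drop]; omega) _ rfl _ k hkd,
          ih (seg.take (seg.length / 2)).length (by simp [List.length_take]; omega) _ rfl _ k hkt,
          getD_fold_modify_not_mem "1" _ _ k hkd,
          getD_fold_modify_not_mem "0" _ _ k hkt]

lemma take_drop_disjoint (l : List (String × Int)) (m : ℕ) (h : (l.map Prod.fst).Nodup) :
    ∀ k, k ∈ (l.take m).map Prod.fst → k ∉ (l.drop m).map Prod.fst := by
  have h2 := h
  rw [← List.take_append_drop m l, List.map_append, List.nodup_append] at h2
  intro k hk hk'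
  exact h2.2.2 k hk k hk' rfl

-- the heart: A's recursive splitting gives position j of a segment exactly B's bit path
lemma getD_assignA_mem : ∀ (n : ℕ) (seg : List (String × Int)), seg.length = n →
    (seg.map Prod.fst).Nodup →
    ∀ (d : PySem.Dict String String) (j : ℕ) (hj : j < seg.length),
    (assignA seg d).getD (seg[j].1) "" = d.getD (seg[j].1) "" ++ codeB j 0 seg.length := by
  intro n
  induction n using Nat.strong_induction_on with
  | _ n ih =>
    intro seg hlen hnd d j hj
    rw [assignA]
    by_cases hs : seg.length ≤ 1
    · have hc : codeB j 0 seg.length = "" := by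
        rw [codeB, dif_pos (show ((seg.length:Int)) - 0 ≤ 1 by omega)]
      simp [hs, hc]
    · simp only [hs, if_false]
      have h2 : 2 ≤ seg.length := by omega
      set mid := seg.length / 2 with hmiddef
      have hmpos : 0 < mid := by omega
      have hmlt : mid < seg.length := by omega
      have hndt : ((seg.take mid).map Prod.fst).Nodup :=
        hnd.sublist ((List.take_sublist mid seg).map Prod.fst)
      have hndd : ((seg.drop mid).map Prod.fst).Nodup :=
        hnd.sublist ((List.drop_sublist mid seg).map Prod.fst)
      have hdisj := take_drop_disjoint seg mid hnd
      by_cases hjm : j < mid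
      · -- position j falls in the left half: one '0', then recurse left
        have hget : (seg.take mid)[j]'(by simp [List.length_take]; omega) = seg[j] :=
          List.getElem_take
        have hkmem : seg[j].1 ∈ (seg.take mid).map Prod.fst := by
          rw [← hget]; exact List.mem_map.mpr ⟨_, List.getElem_mem _, rfl⟩
        have hknotr : seg[j].1 ∉ (seg.drop mid).map Prod.fst := hdisj _ hkmem
        rw [getD_assignA_not_mem (seg.drop mid).length _ rfl _ _ hknotr]
        have hihl := ih (seg.take mid).length (by simp [List.length_take]; omega)
          (seg.take mid) rfl hndt
          ((seg.drop mid).foldl (fun d p => d.modify p.1 "" (· ++ "1"))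
            ((seg.take mid).foldl (fun d p => d.modify p.1 "" (· ++ "0")) d))
          j (by simp [List.length_take]; omega)
        rw [hget] at hihl
        rw [hihl]
        rw [getD_fold_modify_not_mem "1" _ _ _ hknotr,
            getD_fold_modify_mem "0" _ _ _ hndt hkmem]
        rw [List.length_take, Nat.min_eq_left (le_of_lt hmlt)]
        rw [codeB_left seg.length mid j h2 hmiddef hjm]
        simp [String.append_assoc]
      · -- position j falls in the right half: one '1', then recurse right, shifted by mid
        push_neg at hjm
        have hget : (seg.drop mid)[j - mid]'(by simp [List.length_drop]; omega) = seg[j] := by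
          rw [List.getElem_drop]
          congr 1; omega
        have hkmem : seg[j].1 ∈ (seg.drop mid).map Prod.fst := by
          rw [← hget]; exact List.mem_map.mpr ⟨_, List.getElem_mem _, rfl⟩
        have hknotl : seg[j].1 ∉ (seg.take mid).map Prod.fst := by
          intro hc; exact hdisj _ hc hkmem
        have hihr := ih (seg.drop mid).length (by simp [List.length_drop]; omega)
          (seg.drop mid) rfl hndd
          (assignA (seg.take mid)
            ((seg.drop mid).foldl (fun d p => d.modify p.1 "" (· ++ "1"))
              ((seg.take mid).foldl (fun d p => d.modify p.1 "" (· ++ "0")) d)))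
          (j - mid) (by simp [List.length_drop]; omega)
        rw [hget] at hihr
        rw [hihr]
        rw [getD_assignA_not_mem (seg.take mid).length _ rfl _ _ hknotl]
        rw [getD_fold_modify_mem "1" _ _ _ hndd hkmem,
            getD_fold_modify_not_mem "0" _ _ _ hknotl]
        rw [List.length_drop]
        rw [codeB_right seg.length mid j h2 hmiddef hjm hj]
        simp [String.append_assoc]

theorem create_codes_eq_alt (frequency : List (String × Int))
    (h : (frequency.map Prod.fst).Nodup) :
    create_codes frequency = create_codes_alt frequency := by
  simp only [create_codes, create_codes_alt]
  set S := PySem.List.sorted frequency (fun item => item.2) true with hS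
  have hndS : (S.map Prod.fst).Nodup :=
    (((PySem.List.sorted_perm frequency (fun item => item.2) true).map Prod.fst).symm).nodup h
  have hc0items : (S.foldl (fun d p => d.insert p.1 "") PySem.Dict.empty).items
      = S.map (fun p => (p.1, "")) := by
    have := PySem.Dict.items_foldl_insert_fresh S Prod.fst (fun _ => "") PySem.Dict.empty
      (by intro a _; simp [PySem.Dict.contains_empty]) hndS
    simpa using this
  have hc0keys : (S.foldl (fun d p => d.insert p.1 "") PySem.Dict.empty).keys
      = S.map Prod.fst := by
    simp only [PySem.Dict.keys, hc0items, List.map_map]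
    rfl
  set c0 := S.foldl (fun d p => d.insert p.1 "") PySem.Dict.empty with hc0
  have hFkeys : (assignA S c0).keys = S.map Prod.fst := by
    rw [keys_assignA S.length S rfl c0
      (by intro p hp; rw [hc0keys]; exact List.mem_map.mpr ⟨p, hp, rfl⟩), hc0keys]
  have hFnd : (assignA S c0).keys.Nodup := by rw [hFkeys]; exact hndS
  have hFitems := PySem.Dict.items_eq_map_keys (assignA S c0) hFnd ""
  rw [hFkeys] at hFitems
  have hBmapkey : (PySem.List.enumerate S).map (fun p => p.2.1) = S.map Prod.fst := by
    have : (fun (p : Int × (String × Int)) => p.2.1) = Prod.fst ∘ (fun p => p.2) := rfl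
    rw [this, ← List.map_map, PySem.List.map_snd_enumerate]
  have hBitems : ((PySem.List.enumerate S).foldl
      (fun d p => d.insert p.2.1 (codeB p.1 0 (S.length : Int))) PySem.Dict.empty).items
      = (PySem.List.enumerate S).map (fun p => (p.2.1, codeB p.1 0 (S.length : Int))) := by
    have := PySem.Dict.items_foldl_insert_fresh (PySem.List.enumerate S)
      (fun p => p.2.1) (fun p => codeB p.1 0 (S.length : Int)) PySem.Dict.empty
      (by intro a _; simp [PySem.Dict.contains_empty]) (by rw [hBmapkey]; exact hndS)
    simpa using this
  rw [hFitems, hBitems]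
  apply List.ext_getElem
  · simp [PySem.List.length_enumerate]
  · intro j hj1 hj2
    simp only [List.getElem_map]
    have hjS : j < S.length := by simpa using hj1
    have he : (PySem.List.enumerate S)[j]'(by rw [PySem.List.length_enumerate]; exact hjS)
        = ((0 : Int) + j, S[j]) := PySem.List.getElem_enumerate S 0 j _
    rw [he]
    have hgd := getD_assignA_mem S.length S rfl hndS c0 j hjS
    have hmem : (S[j].1, "") ∈ c0.items := by
      rw [hc0items]; exact List.mem_map.mpr ⟨S[j], List.getElem_mem _, rfl⟩
    have hc0nd : c0.keys.Nodup := by rw [hc0keys]; exact hndS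
    have hzero : c0.getD (S[j].1) "" = "" := PySem.Dict.getD_of_mem_items c0 hmem hc0nd ""
    rw [hgd, hzero]
    simp

-- ===== VERDICT (by name: the statement is the Claim_ definition above) =====
theorem create_codes_spec : Claim_equal_create_codes := by
  intro frequency _ hpre
  unfold Spec_create_codes
  exact create_codes_eq_alt frequency hpre
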